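-- pv_equiv track=rewrite | github.com/JamionW/GRANITE | granite/evaluation/feature_deduplication.py | _analyze_feature_types
-- ===== SOURCE A (Python) =====
-- from typing import Tuple, List
--
-- def _analyze_feature_types(feature_names: List[str]) -> dict:
--     """Analyze the types of features present"""
--
--     type_counts = {
--         'time_features': 0,
--         'count_features': 0,
--         'advantage_features': 0,
--         'concentration_features': 0,
--         'percentile_features': 0,
--         'derived_features': 0,
--         'unknown_features': 0
--     }
--
--     for name in feature_names:
--         name_lower = name.lower()
--         if 'time' in name_lower:
--             type_counts['time_features'] += 1
--         elif 'count' in name_lower: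
--             type_counts['count_features'] += 1
--         elif 'advantage' in name_lower:
--             type_counts['advantage_features'] += 1
--         elif 'concentration' in name_lower:
--             type_counts['concentration_features'] += 1
--         elif 'percentile' in name_lower:
--             type_counts['percentile_features'] += 1
--         elif any(keyword in name_lower for keyword in ['accessibility', 'flexibility', 'equity', 'geographic']):
--             type_counts['derived_features'] += 1
--         else:
--             type_counts['unknown_features'] += 1
--
--     return type_counts
-- ===== SOURCE B (Python) =====
-- from typing import List
--
-- _RULES = [
--     (['time'], 'time_features'),
--     (['count'], 'count_features'),
--     (['advantage'], 'advantage_features'),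
--     (['concentration'], 'concentration_features'),
--     (['percentile'], 'percentile_features'),
--     (['accessibility', 'flexibility', 'equity', 'geographic'], 'derived_features'),
-- ]
--
--
-- def _analyze_feature_types(feature_names: List[str]) -> dict:
--     """Analyze the types of features present"""
--     result = {}
--     remaining = [n.lower() for n in feature_names]
--     for keywords, category in _RULES:
--         matched = [s for s in remaining if any(k in s for k in keywords)]
--         remaining = [s for s in remaining if not any(k in s for k in keywords)]
--         result[category] = len(matched)
--     result['unknown_features'] = len(remaining)
--     return result
-- ===== Notes on version B (the rewrite author's own statement) =====
-- stated objective: alternative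
-- what changed: Replaces A's single pass over names with an if-elif dict mutation per name by a sieve over the rule table: the loop iterates over the six rules, partitioning a shrinking list of lowered names at each stage, so each category count is the length of a partition and 'unknown' is what survives all rules.
import Mathlib
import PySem

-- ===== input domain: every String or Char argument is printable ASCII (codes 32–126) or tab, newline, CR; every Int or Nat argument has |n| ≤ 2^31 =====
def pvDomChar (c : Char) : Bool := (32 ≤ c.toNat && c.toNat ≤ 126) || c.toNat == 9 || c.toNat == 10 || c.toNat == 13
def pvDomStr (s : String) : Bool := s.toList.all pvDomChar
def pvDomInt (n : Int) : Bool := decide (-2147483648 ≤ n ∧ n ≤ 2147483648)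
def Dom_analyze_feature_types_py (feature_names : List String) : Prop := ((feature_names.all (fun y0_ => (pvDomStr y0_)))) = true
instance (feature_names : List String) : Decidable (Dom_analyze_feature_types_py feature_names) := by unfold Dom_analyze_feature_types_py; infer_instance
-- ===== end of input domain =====

-- B replaces A's per-name if-elif dict mutation by a sieve over the rule table:
-- each rule partitions a shrinking list of lowered names; counts are partition lengths (alternative decomposition).

-- ===== PORT A =====
-- one step of A's for-loop: the if-elif cascade incrementing the matching dict slot
def pvStepA (d : PySem.Dict String Int) (name : String) : PySem.Dict String Int :=
  let name_lower := PySem.Str.lower name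
  if PySem.Str.isIn "time" name_lower then d.modify "time_features" 0 (· + 1)
  else if PySem.Str.isIn "count" name_lower then d.modify "count_features" 0 (· + 1)
  else if PySem.Str.isIn "advantage" name_lower then d.modify "advantage_features" 0 (· + 1)
  else if PySem.Str.isIn "concentration" name_lower then d.modify "concentration_features" 0 (· + 1)
  else if PySem.Str.isIn "percentile" name_lower then d.modify "percentile_features" 0 (· + 1)
  else if (["accessibility", "flexibility", "equity", "geographic"].any
            (fun keyword => PySem.Str.isIn keyword name_lower)) then d.modify "derived_features" 0 (· + 1)
  else d.modify "unknown_features" 0 (· + 1)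

def analyze_feature_types_py (feature_names : List String) : List (String × Int) :=
  let type_counts : PySem.Dict String Int := PySem.Dict.ofList
    [("time_features", 0), ("count_features", 0), ("advantage_features", 0),
     ("concentration_features", 0), ("percentile_features", 0),
     ("derived_features", 0), ("unknown_features", 0)]
  (feature_names.foldl pvStepA type_counts).items

-- ===== PORT B =====
def pvRules : List (List String × String) :=
  [(["time"], "time_features"),
   (["count"], "count_features"),
   (["advantage"], "advantage_features"),
   (["concentration"], "concentration_features"),
   (["percentile"], "percentile_features"),
   (["accessibility", "flexibility", "equity", "geographic"], "derived_features")]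

-- 'any(k in s for k in keywords)'
def pvMatch (keywords : List String) (s : String) : Bool :=
  keywords.any (fun k => PySem.Str.isIn k s)

-- the for-loop over _RULES: partition the remaining names at each rule, record the matched count
def pvSieve : List (List String × String) → List String → List (String × Int)
  | [], remaining => [("unknown_features", (remaining.length : Int))]
  | (keywords, category) :: rest, remaining =>
      let matched := remaining.filter (fun s => pvMatch keywords s)
      let remaining' := remaining.filter (fun s => !pvMatch keywords s)
      (category, (matched.length : Int)) :: pvSieve rest remaining'

def analyze_feature_types_py_alt (feature_names : List String) : List (String × Int) :=
  pvSieve pvRules (feature_names.map PySem.Str.lower)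

-- ===== PRECONDITION & SPEC =====
def Spec_analyze_feature_types_py (feature_names : List String) (out : List (String × Int)) : Prop := out = analyze_feature_types_py_alt feature_names
instance (feature_names : List String) (out : List (String × Int)) : Decidable (Spec_analyze_feature_types_py feature_names out) := by unfold Spec_analyze_feature_types_py; infer_instance

-- ===== CLAIM (what is proved, stated in full; the proofs are below) =====
def Claim_equal_analyze_feature_types_py : Prop := ∀ (feature_names : List String), Dom_analyze_feature_types_py feature_names → Spec_analyze_feature_types_py feature_names (analyze_feature_types_py feature_names)

-- ===== LEMMAS AND PROOFS =====

def pvMkD (a b c d e f g : Int) : PySem.Dict String Int :=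
  PySem.Dict.mk
    [("time_features", a), ("count_features", b), ("advantage_features", c),
     ("concentration_features", d), ("percentile_features", e),
     ("derived_features", f), ("unknown_features", g)]

theorem pv_bump_time_features (a b c d e f g : Int) :
    (pvMkD a b c d e f g).modify "time_features" 0 (· + 1) = pvMkD (a + 1) b c d e f g := by
  simp [pvMkD, PySem.Dict.modify, PySem.Dict.get?, PySem.Dict.getD, PySem.Dict.insert]

theorem pv_bump_count_features (a b c d e f g : Int) :
    (pvMkD a b c d e f g).modify "count_features" 0 (· + 1) = pvMkD a (b + 1) c d e f g := by
  simp [pvMkD, PySem.Dict.modify, PySem.Dict.get?, PySem.Dict.getD, PySem.Dict.insert]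

theorem pv_bump_advantage_features (a b c d e f g : Int) :
    (pvMkD a b c d e f g).modify "advantage_features" 0 (· + 1) = pvMkD a b (c + 1) d e f g := by
  simp [pvMkD, PySem.Dict.modify, PySem.Dict.get?, PySem.Dict.getD, PySem.Dict.insert]

theorem pv_bump_concentration_features (a b c d e f g : Int) :
    (pvMkD a b c d e f g).modify "concentration_features" 0 (· + 1) = pvMkD a b c (d + 1) e f g := by
  simp [pvMkD, PySem.Dict.modify, PySem.Dict.get?, PySem.Dict.getD, PySem.Dict.insert]

theorem pv_bump_percentile_features (a b c d e f g : Int) :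
    (pvMkD a b c d e f g).modify "percentile_features" 0 (· + 1) = pvMkD a b c d (e + 1) f g := by
  simp [pvMkD, PySem.Dict.modify, PySem.Dict.get?, PySem.Dict.getD, PySem.Dict.insert]

theorem pv_bump_derived_features (a b c d e f g : Int) :
    (pvMkD a b c d e f g).modify "derived_features" 0 (· + 1) = pvMkD a b c d e (f + 1) g := by
  simp [pvMkD, PySem.Dict.modify, PySem.Dict.get?, PySem.Dict.getD, PySem.Dict.insert]

theorem pv_bump_unknown_features (a b c d e f g : Int) :
    (pvMkD a b c d e f g).modify "unknown_features" 0 (· + 1) = pvMkD a b c d e f (g + 1) := by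
  simp [pvMkD, PySem.Dict.modify, PySem.Dict.get?, PySem.Dict.getD, PySem.Dict.insert]

-- the six sieve predicates and the nested partition chains, as proof abbreviations
def pvM1 (s : String) : Bool := pvMatch ["time"] s
def pvM2 (s : String) : Bool := pvMatch ["count"] s
def pvM3 (s : String) : Bool := pvMatch ["advantage"] s
def pvM4 (s : String) : Bool := pvMatch ["concentration"] s
def pvM5 (s : String) : Bool := pvMatch ["percentile"] s
def pvM6 (s : String) : Bool := pvMatch ["accessibility", "flexibility", "equity", "geographic"] s

def pvR1 (xs : List String) : List String := xs.filter (fun s => !pvM1 s)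
def pvR2 (xs : List String) : List String := (pvR1 xs).filter (fun s => !pvM2 s)
def pvR3 (xs : List String) : List String := (pvR2 xs).filter (fun s => !pvM3 s)
def pvR4 (xs : List String) : List String := (pvR3 xs).filter (fun s => !pvM4 s)
def pvR5 (xs : List String) : List String := (pvR4 xs).filter (fun s => !pvM5 s)
def pvR6 (xs : List String) : List String := (pvR5 xs).filter (fun s => !pvM6 s)

def pvOut (xs : List String) : List (String × Int) :=
  [("time_features", ((xs.filter (fun s => pvM1 s)).length : Int)),
   ("count_features", (((pvR1 xs).filter (fun s => pvM2 s)).length : Int)),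
   ("advantage_features", (((pvR2 xs).filter (fun s => pvM3 s)).length : Int)),
   ("concentration_features", (((pvR3 xs).filter (fun s => pvM4 s)).length : Int)),
   ("percentile_features", (((pvR4 xs).filter (fun s => pvM5 s)).length : Int)),
   ("derived_features", (((pvR5 xs).filter (fun s => pvM6 s)).length : Int)),
   ("unknown_features", ((pvR6 xs).length : Int))]

theorem pv_sieve_eq (xs : List String) : pvSieve pvRules xs = pvOut xs := by
  simp [pvSieve, pvRules, pvOut, pvM1, pvM2, pvM3, pvM4, pvM5, pvM6,
        pvR1, pvR2, pvR3, pvR4, pvR5, pvR6]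

theorem pv_main : ∀ (ns : List String) (a b c d e f g : Int),
    (ns.foldl pvStepA (pvMkD a b c d e f g)).items =
      [("time_features", a + (((ns.map PySem.Str.lower).filter (fun s => pvM1 s)).length : Int)),
       ("count_features", b + (((pvR1 (ns.map PySem.Str.lower)).filter (fun s => pvM2 s)).length : Int)),
       ("advantage_features", c + (((pvR2 (ns.map PySem.Str.lower)).filter (fun s => pvM3 s)).length : Int)),
       ("concentration_features", d + (((pvR3 (ns.map PySem.Str.lower)).filter (fun s => pvM4 s)).length : Int)),
       ("percentile_features", e + (((pvR4 (ns.map PySem.Str.lower)).filter (fun s => pvM5 s)).length : Int)),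
       ("derived_features", f + (((pvR5 (ns.map PySem.Str.lower)).filter (fun s => pvM6 s)).length : Int)),
       ("unknown_features", g + ((pvR6 (ns.map PySem.Str.lower)).length : Int))] := by
  intro ns
  induction ns with
  | nil => intro a b c d e f g; simp [pvMkD, pvR1, pvR2, pvR3, pvR4, pvR5, pvR6]
  | cons n rest ih =>
    intro a b c d e f g
    simp only [List.foldl_cons, List.map_cons]
    by_cases h1 : pvM1 (PySem.Str.lower n) = true
    · rw [show pvStepA (pvMkD a b c d e f g) n = pvMkD (a + 1) b c d e f g from by
        simp only [pvStepA]
        rw [if_pos (by simpa [pvM1, pvMatch] using h1)]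
        exact pv_bump_time_features a b c d e f g]
      rw [ih]
      simp [pvR1, pvR2, pvR3, pvR4, pvR5, pvR6, h1]
      ring_nf
    · by_cases h2 : pvM2 (PySem.Str.lower n) = true
      · rw [show pvStepA (pvMkD a b c d e f g) n = pvMkD a (b + 1) c d e f g from by
          simp only [pvStepA]
          rw [if_neg (by simpa [pvM1, pvMatch] using h1),
              if_pos (by simpa [pvM2, pvMatch] using h2)]
          exact pv_bump_count_features a b c d e f g]
        rw [ih]
        simp [pvR1, pvR2, pvR3, pvR4, pvR5, pvR6, h1, h2]
        ring_nf
      · by_cases h3 : pvM3 (PySem.Str.lower n) = true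
        · rw [show pvStepA (pvMkD a b c d e f g) n = pvMkD a b (c + 1) d e f g from by
            simp only [pvStepA]
            rw [if_neg (by simpa [pvM1, pvMatch] using h1),
                if_neg (by simpa [pvM2, pvMatch] using h2),
                if_pos (by simpa [pvM3, pvMatch] using h3)]
            exact pv_bump_advantage_features a b c d e f g]
          rw [ih]
          simp [pvR1, pvR2, pvR3, pvR4, pvR5, pvR6, h1, h2, h3]
          ring_nf
        · by_cases h4 : pvM4 (PySem.Str.lower n) = true
          · rw [show pvStepA (pvMkD a b c d e f g) n = pvMkD a b c (d + 1) e f g from by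
              simp only [pvStepA]
              rw [if_neg (by simpa [pvM1, pvMatch] using h1),
                  if_neg (by simpa [pvM2, pvMatch] using h2),
                  if_neg (by simpa [pvM3, pvMatch] using h3),
                  if_pos (by simpa [pvM4, pvMatch] using h4)]
              exact pv_bump_concentration_features a b c d e f g]
            rw [ih]
            simp [pvR1, pvR2, pvR3, pvR4, pvR5, pvR6, h1, h2, h3, h4]
            ring_nf
          · by_cases h5 : pvM5 (PySem.Str.lower n) = true
            · rw [show pvStepA (pvMkD a b c d e f g) n = pvMkD a b c d (e + 1) f g from by
                simp only [pvStepA]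
                rw [if_neg (by simpa [pvM1, pvMatch] using h1),
                    if_neg (by simpa [pvM2, pvMatch] using h2),
                    if_neg (by simpa [pvM3, pvMatch] using h3),
                    if_neg (by simpa [pvM4, pvMatch] using h4),
                    if_pos (by simpa [pvM5, pvMatch] using h5)]
                exact pv_bump_percentile_features a b c d e f g]
              rw [ih]
              simp [pvR1, pvR2, pvR3, pvR4, pvR5, pvR6, h1, h2, h3, h4, h5]
              ring_nf
            · by_cases h6 : pvM6 (PySem.Str.lower n) = true
              · rw [show pvStepA (pvMkD a b c d e f g) n = pvMkD a b c d e (f + 1) g from by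
                  simp only [pvStepA]
                  rw [if_neg (by simpa [pvM1, pvMatch] using h1),
                      if_neg (by simpa [pvM2, pvMatch] using h2),
                      if_neg (by simpa [pvM3, pvMatch] using h3),
                      if_neg (by simpa [pvM4, pvMatch] using h4),
                      if_neg (by simpa [pvM5, pvMatch] using h5),
                      if_pos (by simpa [pvM6, pvMatch] using h6)]
                  exact pv_bump_derived_features a b c d e f g]
                rw [ih]
                simp [pvR1, pvR2, pvR3, pvR4, pvR5, pvR6, h1, h2, h3, h4, h5, h6]
                ring_nf
              · rw [show pvStepA (pvMkD a b c d e f g) n = pvMkD a b c d e f (g + 1) from by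
                  simp only [pvStepA]
                  rw [if_neg (by simpa [pvM1, pvMatch] using h1),
                      if_neg (by simpa [pvM2, pvMatch] using h2),
                      if_neg (by simpa [pvM3, pvMatch] using h3),
                      if_neg (by simpa [pvM4, pvMatch] using h4),
                      if_neg (by simpa [pvM5, pvMatch] using h5),
                      if_neg (by simpa [pvM6, pvMatch] using h6)]
                  exact pv_bump_unknown_features a b c d e f g]
                rw [ih]
                simp [pvR1, pvR2, pvR3, pvR4, pvR5, pvR6, h1, h2, h3, h4, h5, h6]
                ring_nf

-- ===== VERDICT (by name: the statement is the Claim_ definition above) =====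
theorem analyze_feature_types_py_spec : Claim_equal_analyze_feature_types_py := by
  intro ns _
  show _ = _
  unfold analyze_feature_types_py analyze_feature_types_py_alt
  rw [show (PySem.Dict.ofList
      [("time_features", (0:Int)), ("count_features", 0), ("advantage_features", 0),
       ("concentration_features", 0), ("percentile_features", 0),
       ("derived_features", 0), ("unknown_features", 0)]) = pvMkD 0 0 0 0 0 0 0 from by decide]
  rw [pv_main, pv_sieve_eq]
  simp [pvOut]
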